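-- pv_equiv track=rewrite | github.com/bbbjihan/baekjoon | python/6904.Picture_Perfect.py | get_min_perimeter
-- ===== SOURCE A (Python) =====
-- def get_min_perimeter(n):
--     min_perimeter = n * 2 + 2
--     g_a = 1
--     g_b = n
--     for a in range(1, n + 1):
--         if n % a == 0:
--             b = n // a
--             if 2 * (a + b) < min_perimeter:
--                 min_perimeter = 2 * (a + b)
--                 g_a = a
--                 g_b = b
--     return min_perimeter, g_a, g_b
-- ===== SOURCE B (Python) =====
-- def get_min_perimeter(n):
--     a = 1
--     d = 1
--     while a * a <= n:
--         if n % a == 0: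
--             d = a
--         a += 1
--     b = n // d
--     return 2 * (d + b), d, b
-- ===== Notes on version B (the rewrite author's own statement) =====
-- stated objective: faster
-- what changed: Instead of scanning every a in 1..n for divisors and tracking the running minimum perimeter, B scans only a with a*a <= n, keeps the last (largest) divisor found, and computes the answer from that single divisor in closed form.
import Mathlib
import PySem

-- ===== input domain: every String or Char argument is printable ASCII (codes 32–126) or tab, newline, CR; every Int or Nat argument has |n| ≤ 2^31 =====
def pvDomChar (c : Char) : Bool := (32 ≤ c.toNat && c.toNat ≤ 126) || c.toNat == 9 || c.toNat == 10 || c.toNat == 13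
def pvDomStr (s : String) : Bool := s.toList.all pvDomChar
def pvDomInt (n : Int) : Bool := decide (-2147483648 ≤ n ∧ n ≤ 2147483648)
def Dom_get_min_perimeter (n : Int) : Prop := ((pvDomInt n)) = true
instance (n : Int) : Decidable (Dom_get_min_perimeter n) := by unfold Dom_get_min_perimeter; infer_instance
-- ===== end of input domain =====

-- B replaces A's full scan of 1..n by a scan of a with a*a ≤ n keeping the largest such
-- divisor (objective: faster, O(sqrt n) instead of O(n) iterations).

-- ===== PORT A =====
-- loop body of A's for-loop (state = (min_perimeter, g_a, g_b))
def pvStepA (n : Int) (st : Int × Int × Int) (a : Int) : Int × Int × Int :=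
  if PySem.Int.mod n a = 0 then
    let b := PySem.Int.floordiv n a
    if 2 * (a + b) < st.1 then (2 * (a + b), a, b) else st
  else st

def get_min_perimeter (n : Int) : List Int :=
  let st := (PySem.List.pyRange 1 (n + 1) 1).foldl (pvStepA n) (n * 2 + 2, 1, n)
  [st.1, st.2.1, st.2.2]

-- ===== PORT B =====
-- B's while-loop (fuel only makes the recursion structural; loop exits when a*a > n)
def pvLoopB (n : Int) : Int → Int → Nat → Int
  | _, d, 0 => d
  | a, d, fuel + 1 =>
    if a * a ≤ n then
      pvLoopB n (a + 1) (if PySem.Int.mod n a = 0 then a else d) fuel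
    else d

def get_min_perimeter_alt (n : Int) : List Int :=
  let d := pvLoopB n 1 1 n.toNat
  let b := PySem.Int.floordiv n d
  [2 * (d + b), d, b]

-- ===== PRECONDITION & SPEC =====
def Spec_get_min_perimeter (n : Int) (out : List Int) : Prop := out = get_min_perimeter_alt n
instance (n : Int) (out : List Int) : Decidable (Spec_get_min_perimeter n out) := by unfold Spec_get_min_perimeter; infer_instance

-- ===== CLAIM (what is proved, stated in full; the proofs are below) =====
def Claim_equal_get_min_perimeter : Prop := ∀ (n : Int), Dom_get_min_perimeter n → Spec_get_min_perimeter n (get_min_perimeter n)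

-- ===== LEMMAS AND PROOFS =====

-- d is the largest divisor of n that is ≤ m and whose square is ≤ n
def IsBest (n m d : Int) : Prop :=
  1 ≤ d ∧ d ∣ n ∧ d * d ≤ n ∧ d ≤ m ∧
    ∀ e, 1 ≤ e → e ∣ n → e * e ≤ n → e ≤ m → e ≤ d

lemma fd_exact {a c n : Int} (ha : 0 < a) (h : n = a * c) :
    PySem.Int.floordiv n a = c := by
  rw [PySem.Int.floordiv_eq_ediv_of_pos ha, h, Int.mul_ediv_cancel_left _ (ne_of_gt ha)]

lemma best_unique {n m d₁ d₂ : Int} (h₁ : IsBest n m d₁) (h₂ : IsBest n m d₂) : d₁ = d₂ :=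
  le_antisymm (h₂.2.2.2.2 d₁ h₁.1 h₁.2.1 h₁.2.2.1 h₁.2.2.2.1)
    (h₁.2.2.2.2 d₂ h₂.1 h₂.2.1 h₂.2.2.1 h₂.2.2.2.1)

lemma exists_best {n : Int} (hn : 1 ≤ n) : ∀ m : Int, 1 ≤ m → ∃ d, IsBest n m d := by
  intro m hm
  induction m, hm using Int.le_induction with
  | base =>
    exact ⟨1, le_refl 1, one_dvd n, by linarith, le_refl 1, fun e h1 _ _ he => he⟩
  | succ m hm ih =>
    obtain ⟨d, hd⟩ := ih
    by_cases hca : (m + 1) ∣ n ∧ (m + 1) * (m + 1) ≤ n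
    · exact ⟨m + 1, by linarith, hca.1, hca.2, le_refl _, fun e _ _ _ he => he⟩
    · refine ⟨d, hd.1, hd.2.1, hd.2.2.1, by linarith [hd.2.2.2.1], ?_⟩
      intro e h1 h2 h3 h4
      rcases lt_or_eq_of_le h4 with h | h
      · exact hd.2.2.2.2 e h1 h2 h3 (by omega)
      · exact absurd ⟨h ▸ h2, h ▸ h3⟩ hca

-- strict decrease of a + n/a on divisors below sqrt n
lemma key_lt {n a b : Int} (ha : 1 ≤ a) (hab : a < b) (hb2 : b * b ≤ n)
    (hda : a ∣ n) (hdb : b ∣ n) :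
    b + PySem.Int.floordiv n b < a + PySem.Int.floordiv n a := by
  obtain ⟨c, hc⟩ := hda
  obtain ⟨c', hc'⟩ := hdb
  rw [fd_exact (by linarith) hc, fd_exact (by linarith) hc']
  have h2 : 0 < n - a * b := by nlinarith
  have h3 : 0 < (b - a) * (n - a * b) := mul_pos (by omega) h2
  have h4 : (b - a) * (n - a * b) = a * b * (a + c - b - c') := by
    linear_combination b * hc - a * hc'
  nlinarith [mul_pos (show (0:Int) < a by omega) (show (0:Int) < b by omega)]

lemma key_le {n a b : Int} (ha : 1 ≤ a) (hab : a ≤ b) (hb2 : b * b ≤ n)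
    (hda : a ∣ n) (hdb : b ∣ n) :
    b + PySem.Int.floordiv n b ≤ a + PySem.Int.floordiv n a := by
  rcases lt_or_eq_of_le hab with h | h
  · exact le_of_lt (key_lt ha h hb2 hda hdb)
  · rw [h]

lemma foldA {n : Int} (hn : 1 ≤ n) :
    ∀ m : Int, 1 ≤ m → ∀ d, IsBest n m d →
      (PySem.List.pyRange 1 (m + 1) 1).foldl (pvStepA n) (n * 2 + 2, 1, n)
        = (2 * (d + PySem.Int.floordiv n d), d, PySem.Int.floordiv n d) := by
  intro m hm
  induction m, hm using Int.le_induction with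
  | base =>
    intro d hd
    have hd1 : d = 1 := le_antisymm hd.2.2.2.1 hd.1
    subst hd1
    rw [PySem.List.pyRange_one_singleton]
    have h1 : PySem.Int.mod n 1 = 0 := by
      rw [PySem.Int.mod_eq_zero_iff_dvd]; exact one_dvd n
    have hf : PySem.Int.floordiv n 1 = n := fd_exact one_pos (one_mul n).symm
    have hstep : pvStepA n (n * 2 + 2, 1, n) 1 = (n * 2 + 2, 1, n) := by
      simp only [pvStepA, h1, if_true]
      rw [hf, if_neg (by omega)]
    rw [List.foldl_cons, List.foldl_nil, hstep, hf]
    have h2 : n * 2 + 2 = 2 * (1 + n) := by ring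
    rw [h2]
  | succ m hm ih =>
    intro d' hd'
    obtain ⟨d, hd⟩ := exists_best hn m hm
    have hstep : PySem.List.pyRange 1 (m + 1 + 1) 1
        = PySem.List.pyRange 1 (m + 1) 1 ++ [m + 1] :=
      PySem.List.pyRange_one_succ_right (by omega)
    rw [hstep, List.foldl_append, ih d hd]
    have hdm : d ≤ m := hd.2.2.2.1
    simp only [List.foldl, pvStepA]
    by_cases hdvd : (m + 1) ∣ n
    · have hmod : PySem.Int.mod n (m + 1) = 0 := by
        rw [PySem.Int.mod_eq_zero_iff_dvd]; exact hdvd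
      rw [if_pos hmod]
      by_cases hsq : (m + 1) * (m + 1) ≤ n
      · -- m+1 is a new, strictly better divisor; d' = m+1
        have hlt : (m + 1) + PySem.Int.floordiv n (m + 1)
            < d + PySem.Int.floordiv n d :=
          key_lt hd.1 (by omega) hsq hd.2.1 hdvd
        rw [if_pos (by omega)]
        have : d' = m + 1 :=
          le_antisymm hd'.2.2.2.1
            (hd'.2.2.2.2 (m + 1) (by omega) hdvd hsq (le_refl _))
        rw [this]
      · -- the cofactor n/(m+1) was already seen; no strict improvement, d' = d
        obtain ⟨c, hc⟩ := hdvd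
        have hm1 : (0:Int) < m + 1 := by omega
        have hfc : PySem.Int.floordiv n (m + 1) = c := fd_exact hm1 hc
        have hc1 : 1 ≤ c := by nlinarith
        have hcm : c < m + 1 := by nlinarith
        have hcdvd : c ∣ n := ⟨m + 1, by linarith [hc]⟩
        have hcsq : c * c ≤ n := by nlinarith
        have hcd : c ≤ d := hd.2.2.2.2 c hc1 hcdvd hcsq (by omega)
        have hfcc : PySem.Int.floordiv n c = m + 1 :=
          fd_exact (by omega) (by linarith [hc])
        have hge : d + PySem.Int.floordiv n d ≤ c + PySem.Int.floordiv n c :=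
          key_le hc1 hcd hd.2.2.1 hcdvd hd.2.1
        rw [hfc, if_neg (by rw [hfcc] at hge; omega)]
        have hdd : d' = d := by
          refine best_unique hd' ⟨hd.1, hd.2.1, hd.2.2.1, by omega, ?_⟩
          intro e h1 h2 h3 h4
          rcases lt_or_eq_of_le h4 with h | h
          · exact hd.2.2.2.2 e h1 h2 h3 (by omega)
          · exact absurd (h ▸ h3) hsq
        rw [hdd]
    · have hmod : PySem.Int.mod n (m + 1) ≠ 0 := by
        simp only [ne_eq, PySem.Int.mod_eq_zero_iff_dvd]; exact hdvd
      rw [if_neg hmod]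
      have hdd : d' = d := by
        refine best_unique hd' ⟨hd.1, hd.2.1, hd.2.2.1, by omega, ?_⟩
        intro e h1 h2 h3 h4
        rcases lt_or_eq_of_le h4 with h | h
        · exact hd.2.2.2.2 e h1 h2 h3 (by omega)
        · exact absurd (h ▸ h2) hdvd
      rw [hdd]

lemma loopB_best {n : Int} (hn : 1 ≤ n) :
    ∀ (fuel : Nat) (a d : Int), 1 ≤ d → n < a + fuel →
      (d ∣ n ∧ d * d ≤ n ∧ d < a ∧
        ∀ e, 1 ≤ e → e ∣ n → e * e ≤ n → e < a → e ≤ d) →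
      ∀ d', IsBest n n d' → pvLoopB n a d fuel = d' := by
  intro fuel
  induction fuel with
  | zero =>
    intro a d hd1 hfa hinv d' hd'
    have ha : n < a := by omega
    refine best_unique ⟨hd1, hinv.1, hinv.2.1, Int.le_of_dvd (by omega) hinv.1, ?_⟩ hd'
    intro e h1 h2 h3 _
    exact hinv.2.2.2 e h1 h2 h3 (by nlinarith)
  | succ f ih =>
    intro a d hd1 hfa hinv d' hd'
    show (if a * a ≤ n then
        pvLoopB n (a + 1) (if PySem.Int.mod n a = 0 then a else d) f
      else d) = d'
    have ha1 : 1 ≤ a := by linarith [hinv.2.2.1]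
    by_cases hsq : a * a ≤ n
    · rw [if_pos hsq]
      by_cases hdvd : a ∣ n
      · have hmod : PySem.Int.mod n a = 0 := by
          rw [PySem.Int.mod_eq_zero_iff_dvd]; exact hdvd
        rw [hmod, if_pos rfl]
        refine ih (a + 1) a ha1 (by push_cast at hfa ⊢; omega)
          ⟨hdvd, hsq, by omega, fun e _ _ _ he => by omega⟩ d' hd'
      · have hmod : PySem.Int.mod n a ≠ 0 := by
          simp only [ne_eq, PySem.Int.mod_eq_zero_iff_dvd]; exact hdvd
        rw [if_neg hmod]
        refine ih (a + 1) d hd1 (by push_cast at hfa ⊢; omega)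
          ⟨hinv.1, hinv.2.1, by omega, ?_⟩ d' hd'
        intro e h1 h2 h3 h4
        have hea : e ≠ a := fun h => hdvd (h ▸ h2)
        exact hinv.2.2.2 e h1 h2 h3 (by omega)
    · rw [if_neg hsq]
      refine best_unique ⟨hd1, hinv.1, hinv.2.1, Int.le_of_dvd (by omega) hinv.1, ?_⟩ hd'
      intro e h1 h2 h3 _
      exact hinv.2.2.2 e h1 h2 h3 (by nlinarith)

-- ===== VERDICT (by name: the statement is the Claim_ definition above) =====
theorem get_min_perimeter_spec : Claim_equal_get_min_perimeter := by
  intro n _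
  unfold Spec_get_min_perimeter get_min_perimeter get_min_perimeter_alt
  by_cases hn : 1 ≤ n
  · obtain ⟨d', hd'⟩ := exists_best hn n hn
    have hA := foldA hn n hn d' hd'
    -- B's loop: first iteration (a = 1) leaves d = 1 either way, then the invariant holds
    obtain ⟨f, hf⟩ : ∃ f, n.toNat = f + 1 := ⟨n.toNat - 1, by omega⟩
    have hB : pvLoopB n 1 1 n.toNat = d' := by
      rw [hf]
      show (if 1 * 1 ≤ n then
          pvLoopB n (1 + 1) (if PySem.Int.mod n 1 = 0 then 1 else 1) f
        else 1) = d'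
      rw [if_pos (by omega), ite_self]
      refine loopB_best hn f 2 1 (le_refl 1) (by omega)
        ⟨one_dvd n, by omega, by omega, fun e h1 _ _ he => by omega⟩ d' hd'
    rw [hA, hB]
  · -- n ≤ 0: A's range is empty and B's loop runs zero times
    have h0 : n.toNat = 0 := by omega
    rw [PySem.List.pyRange_one_eq_nil (by omega), h0]
    show [n * 2 + 2, 1, n] = [2 * (1 + PySem.Int.floordiv n 1), 1, PySem.Int.floordiv n 1]
    rw [fd_exact one_pos (one_mul n).symm]
    simp only [List.cons.injEq, and_true]
    ring
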